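-- pv_equiv track=rewrite | github.com/jaeeun49/Algorithm | programmers/Level 1/로또의 최고 순위와 최저 순위.py | solution
-- ===== SOURCE A (Python) =====
-- def solution(lottos, win_nums):
--     count = 0
--     zero = lottos.count(0)
--     lottos = [x for x in lottos if x != 0]
--     rank = {6:1, 5:2, 4:3, 3:4, 2:5, 1:6, 0:6}
--     for num in lottos:
--         if num in win_nums:
--             count += 1
--     return rank[count + zero],rank[count]
-- ===== SOURCE B (Python) =====
-- def solution(lottos, win_nums):
--     ls = sorted(lottos)
--     ws = sorted(win_nums)
--     zeros = matched = 0
--     j = 0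
--     m = len(ws)
--     for x in ls:
--         if x == 0:
--             zeros += 1
--         else:
--             while j < m and ws[j] < x:
--                 j += 1
--             if j < m and ws[j] == x:
--                 matched += 1
--     return (min(7 - (matched + zeros), 6), min(7 - matched, 6))
-- ===== Notes on version B (the rewrite author's own statement) =====
-- stated objective: alternative
-- what changed: B sorts both lists and counts matches with a two-pointer merge intersection (zeros counted in the same sweep), replacing A's filter pass, per-element membership scans of win_nums and the precomputed rank dict, which becomes the closed form min(7-c, 6).
import Mathlib
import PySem

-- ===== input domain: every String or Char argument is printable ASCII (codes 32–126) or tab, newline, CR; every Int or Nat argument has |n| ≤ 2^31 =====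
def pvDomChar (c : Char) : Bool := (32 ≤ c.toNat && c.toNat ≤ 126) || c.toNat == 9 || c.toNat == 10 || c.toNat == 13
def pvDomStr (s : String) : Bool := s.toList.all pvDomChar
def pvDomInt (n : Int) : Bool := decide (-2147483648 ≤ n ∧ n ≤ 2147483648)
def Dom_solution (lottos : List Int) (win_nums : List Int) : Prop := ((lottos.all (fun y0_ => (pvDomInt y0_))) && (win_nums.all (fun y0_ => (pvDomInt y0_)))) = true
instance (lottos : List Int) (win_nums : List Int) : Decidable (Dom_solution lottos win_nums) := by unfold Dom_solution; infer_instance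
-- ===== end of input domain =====

-- B sorts both lists and counts the matches by a two-pointer merge intersection (no
-- membership scans, no rank table: the rank is the closed form min(7-c, 6)); objective: alternative.

-- ===== PORT A =====
def solution (lottos : List Int) (win_nums : List Int) : Int × Int :=
  let count : Int := 0
  let zero : Int := (PySem.List.count lottos 0 : Int)
  let lottos' := lottos.filter (fun x => x != 0)
  let rank : PySem.Dict Int Int :=
    PySem.Dict.ofList [(6,1),(5,2),(4,3),(3,4),(2,5),(1,6),(0,6)]
  let count := lottos'.foldl (fun c num => if num ∈ win_nums then c + 1 else c) count
  -- rank[k]: Dict.get? none = KeyError; excluded by Pre_solution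
  ((rank.get? (count + zero)).getD 0, (rank.get? count).getD 0)

-- ===== PORT B =====
-- inner 'while j < m and ws[j] < x: j += 1' : advancing the pointer = dropping the < x prefix
def dropLT (ws : List Int) (x : Int) : List Int :=
  match ws with
  | [] => []
  | w :: t => if w < x then dropLT t x else w :: t

-- the 'for x in ls' loop, carrying (zeros, matched) and the remaining suffix of ws
def mergeLoop (ls : List Int) (ws : List Int) (zeros matched : Int) : Int × Int :=
  match ls with
  | [] => (zeros, matched)
  | x :: t =>
    if x = 0 then mergeLoop t ws (zeros + 1) matched
    else
      match dropLT ws x with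
      | [] => mergeLoop t [] zeros matched
      | w :: r =>
        if w = x then mergeLoop t (w :: r) zeros (matched + 1)
        else mergeLoop t (w :: r) zeros matched

def solution_alt (lottos : List Int) (win_nums : List Int) : Int × Int :=
  let ls := PySem.List.sorted lottos (fun x => x)
  let ws := PySem.List.sorted win_nums (fun x => x)
  let p := mergeLoop ls ws 0 0
  (min (7 - (p.2 + p.1)) 6, min (7 - p.2) 6)

-- ===== PRECONDITION & SPEC =====
-- Pre_ excludes exactly the inputs where A raises KeyError: zeros plus matched nonzero
-- numbers exceeding 6, so count+zero is outside the keys 0..6 of the rank table.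
def Pre_solution (lottos : List Int) (win_nums : List Int) : Prop :=
  lottos.count 0 + lottos.countP (fun x => decide (x ≠ 0 ∧ x ∈ win_nums)) ≤ 6
instance (lottos : List Int) (win_nums : List Int) : Decidable (Pre_solution lottos win_nums) := by unfold Pre_solution; infer_instance
def pvWitness_solution : List Int × List Int := ([45, 4, 35, 20, 3, 9], [20, 9, 3, 45, 4, 35])

def Spec_solution (lottos : List Int) (win_nums : List Int) (out : Int × Int) : Prop := out = solution_alt lottos win_nums
instance (lottos : List Int) (win_nums : List Int) (out : Int × Int) : Decidable (Spec_solution lottos win_nums out) := by unfold Spec_solution; infer_instance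

-- ===== CLAIM (what is proved, stated in full; the proofs are below) =====
def Claim_equal_solution : Prop := ∀ (lottos : List Int) (win_nums : List Int), Dom_solution lottos win_nums → Pre_solution lottos win_nums → Spec_solution lottos win_nums (solution lottos win_nums)

-- ===== LEMMAS AND PROOFS =====

-- dropping the < x prefix of a sorted list preserves membership of any y ≥ x
theorem mem_dropLT (ws : List Int) (x y : Int) (hws : ws.Pairwise (· ≤ ·)) (hxy : x ≤ y) :
    y ∈ dropLT ws x ↔ y ∈ ws := by
  induction ws with
  | nil => simp [dropLT]
  | cons w t ih =>
    rcases List.pairwise_cons.mp hws with ⟨_, ht⟩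
    unfold dropLT
    by_cases hw : w < x
    · rw [if_pos hw, ih ht]
      constructor
      · intro h; exact List.mem_cons_of_mem _ h
      · intro h
        rcases List.mem_cons.mp h with h | h
        · omega
        · exact h
    · rw [if_neg hw]

-- every element surviving dropLT is ≥ x (on a sorted list)
theorem dropLT_ge (ws : List Int) (x : Int) (hws : ws.Pairwise (· ≤ ·)) :
    ∀ y ∈ dropLT ws x, x ≤ y := by
  induction ws with
  | nil => simp [dropLT]
  | cons w t ih =>
    rcases List.pairwise_cons.mp hws with ⟨hw', ht⟩
    unfold dropLT
    by_cases hw : w < x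
    · rw [if_pos hw]; exact ih ht
    · rw [if_neg hw]
      intro y hy
      rcases List.mem_cons.mp hy with h | h
      · omega
      · have := hw' y h; omega

theorem dropLT_pairwise (ws : List Int) (x : Int) (hws : ws.Pairwise (· ≤ ·)) :
    (dropLT ws x).Pairwise (· ≤ ·) := by
  induction ws with
  | nil => simp [dropLT]
  | cons w t ih =>
    rcases List.pairwise_cons.mp hws with ⟨_, ht⟩
    unfold dropLT
    by_cases hw : w < x
    · rw [if_pos hw]; exact ih ht
    · rw [if_neg hw]; exact hws

-- loop invariant: mergeLoop on sorted lists adds the zero count and the match count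
theorem mergeLoop_spec (ls : List Int) (ws : List Int) (z m : Int)
    (hls : ls.Pairwise (· ≤ ·)) (hws : ws.Pairwise (· ≤ ·)) :
    mergeLoop ls ws z m
      = (z + (ls.count 0 : Int),
         m + (ls.countP (fun x => decide (x ≠ 0 ∧ x ∈ ws)) : Int)) := by
  induction ls generalizing ws z m with
  | nil => simp [mergeLoop]
  | cons x t ih =>
    rcases List.pairwise_cons.mp hls with ⟨hx', ht⟩
    unfold mergeLoop
    by_cases h0 : x = 0
    · subst h0
      rw [if_pos rfl, ih ws (z + 1) m ht hws]
      rw [Prod.mk.injEq]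
      refine ⟨?_, ?_⟩
      · rw [List.count_cons_self]
        push_cast
        omega
      · rw [List.countP_cons]
        simp
    · rw [if_neg h0]
      have hmemt : ∀ y ∈ t, (y ∈ dropLT ws x ↔ y ∈ ws) := fun y hy =>
        mem_dropLT ws x y hws (hx' y hy)
      have hcongr : ∀ ws2 : List Int, (∀ y ∈ t, (y ∈ ws2 ↔ y ∈ ws)) →
          t.countP (fun y => decide (y ≠ 0 ∧ y ∈ ws2))
            = t.countP (fun y => decide (y ≠ 0 ∧ y ∈ ws)) := by
        intro ws2 hmem
        refine List.countP_congr (fun y hy => ?_)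
        simp [hmem y hy]
      cases hdw : dropLT ws x with
      | nil =>
        have hxnot : x ∉ ws := by
          intro hx
          have := (mem_dropLT ws x x hws le_rfl).mpr hx
          rw [hdw] at this; exact absurd this (List.not_mem_nil)
        show mergeLoop t [] z m = _
        rw [ih [] z m ht List.Pairwise.nil]
        rw [Prod.mk.injEq]
        constructor
        · simp [h0]
        · rw [hcongr [] (fun y hy => hdw ▸ hmemt y hy)]
          simp [hxnot]
      | cons w r =>
        have hdp : (w :: r).Pairwise (· ≤ ·) := hdw ▸ dropLT_pairwise ws x hws
        have hge : ∀ y ∈ w :: r, x ≤ y := fun y hy => dropLT_ge ws x hws y (hdw ▸ hy)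
        have hmemt' : ∀ y ∈ t, (y ∈ (w :: r) ↔ y ∈ ws) := fun y hy => hdw ▸ hmemt y hy
        have hxmem : x ∈ ws ↔ w = x := by
          rw [← mem_dropLT ws x x hws le_rfl, hdw]
          constructor
          · intro h
            rcases List.mem_cons.mp h with h | h
            · omega
            · rcases List.pairwise_cons.mp hdp with ⟨hw', _⟩
              have h1 := hw' x h
              have h2 := hge w (by simp)
              omega
          · intro h; rw [h]; simp
        show (if w = x then mergeLoop t (w :: r) z (m + 1) else mergeLoop t (w :: r) z m) = _
        by_cases hwx : w = x
        · rw [if_pos hwx, ih (w :: r) z (m + 1) ht hdp]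
          rw [Prod.mk.injEq]
          constructor
          · simp [h0]
          · rw [List.countP_cons, hcongr (w :: r) hmemt']
            have hpx : (fun y => decide (y ≠ 0 ∧ y ∈ ws)) x = true := by
              simp [h0, hxmem.mpr hwx]
            simp [hpx]; omega
        · rw [if_neg hwx, ih (w :: r) z m ht hdp]
          rw [Prod.mk.injEq]
          constructor
          · simp [h0]
          · rw [List.countP_cons, hcongr (w :: r) hmemt']
            have hxnot : x ∉ ws := fun hmem => hwx (hxmem.mp hmem)
            have hpx : (fun y => decide (y ≠ 0 ∧ y ∈ ws)) x = false := by
              simp [hxnot]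
            simp [hpx]

-- A's inner membership loop counts the nonzero matches
theorem countfold_eq (win_nums : List Int) (lottos : List Int) :
    (lottos.filter (fun x => x != 0)).foldl
        (fun c num => if num ∈ win_nums then c + 1 else c) (0 : Int)
    = (lottos.countP (fun x => decide (x ≠ 0 ∧ x ∈ win_nums)) : Int) := by
  rw [PySem.List.foldl_ite_add_one]
  simp only [List.countP_filter, zero_add]
  norm_num
  refine List.countP_congr ?_
  intro x _
  simp [bne_iff_ne, and_comm]

-- the rank table equals the closed form on its key range
theorem rank_closed (k : Int) (h0 : 0 ≤ k) (h6 : k ≤ 6) :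
    ((PySem.Dict.ofList ([(6,1),(5,2),(4,3),(3,4),(2,5),(1,6),(0,6)] : List (Int × Int))).get? k).getD 0
      = min (7 - k) 6 := by
  interval_cases k <;> decide

-- ===== VERDICT (by name: the statement is the Claim_ definition above) =====
theorem solution_spec : Claim_equal_solution := by
  intro lottos win_nums _ hpre
  unfold Pre_solution at hpre
  simp only [Spec_solution, solution, solution_alt]
  have hperm := PySem.List.sorted_perm lottos (fun x => x) false
  have hpermw := PySem.List.sorted_perm win_nums (fun x => x) false
  rw [mergeLoop_spec _ _ 0 0 (PySem.List.sorted_pairwise lottos (fun x => x))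
        (PySem.List.sorted_pairwise win_nums (fun x => x))]
  have hcnt : (PySem.List.sorted lottos (fun x => x)).count 0 = lottos.count 0 :=
    hperm.count_eq 0
  have hctp : (PySem.List.sorted lottos (fun x => x)).countP
        (fun x => decide (x ≠ 0 ∧ x ∈ PySem.List.sorted win_nums (fun x => x)))
      = lottos.countP (fun x => decide (x ≠ 0 ∧ x ∈ win_nums)) := by
    rw [hperm.countP_eq]
    refine List.countP_congr (fun y _ => ?_)
    simp [PySem.List.mem_sorted]
  simp only [countfold_eq, zero_add, PySem.List.count_eq, hcnt, hctp]
  have hz : (0:Int) ≤ (lottos.count 0 : Int) := Int.natCast_nonneg _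
  have hc : (0:Int) ≤ (lottos.countP (fun x => decide (x ≠ 0 ∧ x ∈ win_nums)) : Int) := Int.natCast_nonneg _
  have hs : (lottos.count 0 : Int) + (lottos.countP (fun x => decide (x ≠ 0 ∧ x ∈ win_nums)) : Int) ≤ 6 := by
    exact_mod_cast hpre
  rw [rank_closed _ (by omega) (by omega), rank_closed _ (by omega) (by omega)]
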